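-- pv_equiv track=rewrite | github.com/leixiaolin/smartMusic_v2 | split_cqt_helper.py | get_starts_by_overage
-- ===== SOURCE A (Python) =====
-- def get_starts_by_overage(onset_frames):
--     select_starts = []
--     select_starts.append(onset_frames[0])
--     for i in range(1,len(onset_frames)):
--         if onset_frames[i] - onset_frames[i-1] < 8:
--             select_starts[-1] = int((select_starts[-1] + onset_frames[i])/2)
--         else:
--             select_starts.append(onset_frames[i])
--     return select_starts
-- ===== SOURCE B (Python) =====
-- def get_starts_by_overage(onset_frames):
--     # Pass 1: split into contiguous groups at gaps >= 8 (gaps measured on the original list).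
--     groups = []
--     cur = [onset_frames[0]]
--     for prev, x in zip(onset_frames, onset_frames[1:]):
--         if x - prev >= 8:
--             groups.append(cur)
--             cur = [x]
--         else:
--             cur.append(x)
--     groups.append(cur)
--     # Pass 2: fold each group to one value with the running-average recurrence.
--     result = []
--     for g in groups:
--         acc = g[0]
--         for v in g[1:]:
--             acc = int((acc + v) / 2)
--         result.append(acc)
--     return result
-- ===== Notes on version B (the rewrite author's own statement) =====
-- stated objective: alternative
-- what changed: Single loop that mutates the last element of the output in place is replaced by a two-phase decomposition: first group the frames into contiguous runs split at gaps >= 8, then map each run to its left-folded running average.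
-- outside the precondition, e.g. on get_starts_by_overage([]): A raises IndexError, B raises IndexError
import Mathlib
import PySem

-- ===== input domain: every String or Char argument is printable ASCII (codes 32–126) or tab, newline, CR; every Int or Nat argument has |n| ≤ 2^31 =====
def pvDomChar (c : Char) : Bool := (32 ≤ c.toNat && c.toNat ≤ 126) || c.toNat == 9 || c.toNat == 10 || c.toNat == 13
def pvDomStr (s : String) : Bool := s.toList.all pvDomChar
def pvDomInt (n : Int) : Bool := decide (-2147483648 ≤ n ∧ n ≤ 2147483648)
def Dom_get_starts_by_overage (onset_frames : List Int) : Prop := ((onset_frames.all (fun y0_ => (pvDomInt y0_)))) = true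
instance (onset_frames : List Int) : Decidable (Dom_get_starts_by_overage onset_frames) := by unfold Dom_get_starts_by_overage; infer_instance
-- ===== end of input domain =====

-- B replaces A's single loop (which mutates the last output slot) by a two-phase
-- decomposition: group at gaps >= 8, then fold each group to its running average.
-- Equivalence of RETURN values on nonempty lists (A raises IndexError on []).

-- ===== PORT A =====
-- int((a + b)/2): float division then int() truncates toward zero = Int.tdiv
-- (exact here: on Dom all sums fit a float exactly and the accumulator stays
-- between the min and max of the merged values).
-- Python loop over range(1, len): prev = onset_frames[i-1], x = onset_frames[i];
-- select_starts[-1] is the last element of the (always nonempty) accumulator.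
def pvALoop (prev : Int) (select_starts : List Int) : List Int → List Int
  | [] => select_starts
  | x :: rest =>
    if x - prev < 8 then
      pvALoop x (select_starts.dropLast ++ [((select_starts.getLast?.getD 0) + x).tdiv 2]) rest
    else
      pvALoop x (select_starts ++ [x]) rest

def get_starts_by_overage (onset_frames : List Int) : List Int :=
  match onset_frames with
  | [] => []          -- unreachable: Python raises IndexError, excluded by Pre_
  | x :: rest => pvALoop x [x] rest

-- ===== PORT B =====
-- Pass 1: contiguous groups, split where x - prev >= 8.
def pvGroupsGo (prev : Int) (cur : List Int) (groups : List (List Int)) : List Int → List (List Int)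
  | [] => groups ++ [cur]
  | x :: rest =>
    if x - prev ≥ 8 then pvGroupsGo x [x] (groups ++ [cur]) rest
    else pvGroupsGo x (cur ++ [x]) groups rest

-- Pass 2: fold a group to one value with the running-average recurrence.
def pvFoldAvg (g : List Int) : Int :=
  match g with
  | [] => 0           -- unreachable: every group is nonempty
  | h :: t => t.foldl (fun acc v => (acc + v).tdiv 2) h

def get_starts_by_overage_alt (onset_frames : List Int) : List Int :=
  match onset_frames with
  | [] => []          -- unreachable: onset_frames[0] raises IndexError
  | x :: rest => (pvGroupsGo x [x] [] rest).map pvFoldAvg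

-- ===== PRECONDITION & SPEC =====
-- Pre_ excludes only the empty list, on which A (and B) raise IndexError.
def Pre_get_starts_by_overage (onset_frames : List Int) : Prop := onset_frames ≠ []
instance (onset_frames : List Int) : Decidable (Pre_get_starts_by_overage onset_frames) := by
  unfold Pre_get_starts_by_overage; infer_instance

def pvWitness_get_starts_by_overage : List Int := [3, 5, 20, 21, 40]

def Spec_get_starts_by_overage (onset_frames : List Int) (out : List Int) : Prop := out = get_starts_by_overage_alt onset_frames
instance (onset_frames : List Int) (out : List Int) : Decidable (Spec_get_starts_by_overage onset_frames out) := by unfold Spec_get_starts_by_overage; infer_instance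

-- ===== CLAIM (what is proved, stated in full; the proofs are below) =====
def Claim_equal_get_starts_by_overage : Prop := ∀ (onset_frames : List Int), Dom_get_starts_by_overage onset_frames → Pre_get_starts_by_overage onset_frames → Spec_get_starts_by_overage onset_frames (get_starts_by_overage onset_frames)

-- ===== LEMMAS AND PROOFS =====

-- pvGroupsGo only ever appends to its group accumulator.
theorem pvGroupsGo_acc (rest : List Int) :
    ∀ (prev : Int) (cur : List Int) (groups : List (List Int)),
      pvGroupsGo prev cur groups rest = groups ++ pvGroupsGo prev cur [] rest := by
  induction rest with
  | nil => intro prev cur groups; simp [pvGroupsGo]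
  | cons x rest ih =>
    intro prev cur groups
    by_cases h : x - prev ≥ 8
    · simp only [pvGroupsGo, if_pos h]
      rw [ih x [x] (groups ++ [cur]), ih x [x] ([] ++ [cur])]
      simp
    · simp only [pvGroupsGo, if_neg h]
      rw [ih x (cur ++ [x]) groups]

-- appending one element to a nonempty group folds one more averaging step
theorem pvFoldAvg_concat (h : Int) (t : List Int) (x : Int) :
    pvFoldAvg ((h :: t) ++ [x]) = (pvFoldAvg (h :: t) + x).tdiv 2 := by
  simp [pvFoldAvg, List.foldl_append]

-- Main invariant: A's loop, with accumulator res ++ [fold of the open group],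
-- equals res followed by the folded groups of the rest.
theorem pvALoop_eq (rest : List Int) :
    ∀ (prev : Int) (res : List Int) (h : Int) (t : List Int),
      pvALoop prev (res ++ [pvFoldAvg (h :: t)]) rest
        = res ++ (pvGroupsGo prev (h :: t) [] rest).map pvFoldAvg := by
  induction rest with
  | nil => intro prev res h t; simp [pvALoop, pvGroupsGo]
  | cons x rest ih =>
    intro prev res h t
    by_cases hc : x - prev < 8
    · have hn : ¬ x - prev ≥ 8 := by omega
      simp only [pvALoop, if_pos hc, pvGroupsGo, if_neg hn]
      rw [List.dropLast_concat, List.getLast?_concat]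
      simp only [Option.getD_some]
      rw [← pvFoldAvg_concat h t x]
      exact ih x res h (t ++ [x])
    · have hn : x - prev ≥ 8 := by omega
      simp only [pvALoop, if_neg hc, pvGroupsGo, if_pos hn]
      have hfx : pvFoldAvg [x] = x := by simp [pvFoldAvg]
      have h2 := ih x (res ++ [pvFoldAvg (h :: t)]) x []
      rw [hfx] at h2
      rw [h2, pvGroupsGo_acc rest x [x] ([] ++ [h :: t])]
      simp

-- ===== VERDICT (by name: the statement is the Claim_ definition above) =====
theorem get_starts_by_overage_spec : Claim_equal_get_starts_by_overage := by
  intro onset_frames _ hpre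
  unfold Spec_get_starts_by_overage
  match onset_frames with
  | [] => exact absurd rfl hpre
  | x :: rest =>
    show pvALoop x [x] rest = (pvGroupsGo x [x] [] rest).map pvFoldAvg
    have hfx : pvFoldAvg [x] = x := by simp [pvFoldAvg]
    have h2 := pvALoop_eq rest x [] x []
    rw [hfx] at h2
    simpa using h2
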